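-- pv_equiv track=rewrite | github.com/omerturantr/python-programming-language-projects | Exercise7.py | transform
-- ===== SOURCE A (Python) =====
-- def transform(nums):
--     result = 0
--     for i, n in enumerate(nums):
--         if i % 2 == 0:
--             result += n * 2
--         else:
--             result -= n // 2
--     return result
-- ===== SOURCE B (Python) =====
-- def transform(nums):
--     total = 0
--     i = 0
--     n = len(nums)
--     while i + 1 < n:
--         total += 2 * nums[i] - nums[i + 1] // 2
--         i += 2
--     if i < n:
--         total += 2 * nums[i]
--     return total
-- ===== Notes on version B (the rewrite author's own statement) =====
-- stated objective: alternative
-- what changed: Replaces the enumerate loop with an index-parity branch by a pair-stepping loop that consumes two elements per iteration (even element and odd element handled together, no parity test, no enumeration).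
import Mathlib
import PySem

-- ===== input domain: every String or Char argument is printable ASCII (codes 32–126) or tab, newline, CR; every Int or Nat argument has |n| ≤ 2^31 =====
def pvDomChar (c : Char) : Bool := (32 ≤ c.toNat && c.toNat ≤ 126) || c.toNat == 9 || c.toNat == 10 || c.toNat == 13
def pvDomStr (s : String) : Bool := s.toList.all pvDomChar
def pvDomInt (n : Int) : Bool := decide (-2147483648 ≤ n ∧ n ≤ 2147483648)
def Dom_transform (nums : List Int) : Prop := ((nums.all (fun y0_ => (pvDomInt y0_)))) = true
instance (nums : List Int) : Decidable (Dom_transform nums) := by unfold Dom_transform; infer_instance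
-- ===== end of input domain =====

-- B replaces A's enumerate loop with index-parity branch by a pair-stepping loop; same O(n) cost.

-- ===== PORT A =====
def transform (nums : List Int) : Int :=
  (PySem.List.enumerate nums 0).foldl
    (fun result p => if p.1 % 2 == 0 then result + p.2 * 2 else result - PySem.Int.floordiv p.2 2)
    0

-- ===== PORT B =====
-- the while loop of Source B: the suffix nums[i:] is the list argument; two elements per step
def transformAltGo (l : List Int) (total : Int) : Int :=
  match l with
  | [] => total
  | [a] => total + 2 * a
  | a :: b :: rest => transformAltGo rest (total + (2 * a - PySem.Int.floordiv b 2))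

def transform_alt (nums : List Int) : Int := transformAltGo nums 0

-- ===== PRECONDITION & SPEC =====
def Spec_transform (nums : List Int) (out : Int) : Prop := out = transform_alt nums
instance (nums : List Int) (out : Int) : Decidable (Spec_transform nums out) := by unfold Spec_transform; infer_instance

-- ===== CLAIM (what is proved, stated in full; the proofs are below) =====
def Claim_equal_transform : Prop := ∀ (nums : List Int), Dom_transform nums → Spec_transform nums (transform nums)

-- ===== LEMMAS AND PROOFS =====
theorem transform_key : ∀ (l : List Int) (acc : Int) (k : Nat),
    (PySem.List.enumerate l (2 * (k : Int))).foldl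
      (fun result p => if p.1 % 2 == 0 then result + p.2 * 2 else result - PySem.Int.floordiv p.2 2)
      acc = transformAltGo l acc
  | [], acc, k => by simp [PySem.List.enumerate_nil, transformAltGo]
  | [a], acc, k => by
      simp [PySem.List.enumerate_cons, PySem.List.enumerate_nil, transformAltGo,
        Int.mul_comm]
  | a :: b :: rest, acc, k => by
      have h1 : ((2 * (k : Int)) % 2 == 0) = true := by
        simp [Int.mul_emod_right]
      have h2 : ((2 * (k : Int) + 1) % 2 == 0) = false := by
        simp [Int.add_mul_emod_self_left]
      have h3 : (2 * (k : Int) + 1 + 1) = 2 * ((k + 1 : Nat) : Int) := by push_cast; ring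
      have ih := transform_key rest (acc + (2 * a - PySem.Int.floordiv b 2)) (k + 1)
      simp only [PySem.List.enumerate_cons, List.foldl_cons, h1, h2, if_true, h3] at ih ⊢
      simp only [Bool.false_eq_true, if_false, transformAltGo]
      rw [show acc + a * 2 - PySem.Int.floordiv b 2 = acc + (2 * a - PySem.Int.floordiv b 2) by ring]
      exact ih

-- ===== VERDICT (by name: the statement is the Claim_ definition above) =====
theorem transform_spec : Claim_equal_transform := by
  intro nums _
  unfold Spec_transform transform transform_alt
  have := transform_key nums 0 0
  simpa using this
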